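-- pv_equiv track=rewrite | github.com/septa-ma/Datastructures-and-Algorithms | DataStructure/matrix.py | secondaryDiagonal
-- ===== SOURCE A (Python) =====
-- def secondaryDiagonal(matrix):
--     result = []
--     n = len(matrix)
--     for i in range(len(matrix)):
--         for j in range(len(matrix)):
--             if ((i + j) == (n - 1)):
--                 result.append(matrix[i][j])
--     return result
-- ===== SOURCE B (Python) =====
-- def secondaryDiagonal(matrix):
--     n = len(matrix)
--     return [matrix[i][n - 1 - i] for i in range(n)]
-- ===== Notes on version B (the rewrite author's own statement) =====
-- stated objective: faster
-- what changed: replaces the nested scan over all n^2 (i,j) pairs by direct indexing matrix[i][n-1-i] in a single comprehension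
import Mathlib
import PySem

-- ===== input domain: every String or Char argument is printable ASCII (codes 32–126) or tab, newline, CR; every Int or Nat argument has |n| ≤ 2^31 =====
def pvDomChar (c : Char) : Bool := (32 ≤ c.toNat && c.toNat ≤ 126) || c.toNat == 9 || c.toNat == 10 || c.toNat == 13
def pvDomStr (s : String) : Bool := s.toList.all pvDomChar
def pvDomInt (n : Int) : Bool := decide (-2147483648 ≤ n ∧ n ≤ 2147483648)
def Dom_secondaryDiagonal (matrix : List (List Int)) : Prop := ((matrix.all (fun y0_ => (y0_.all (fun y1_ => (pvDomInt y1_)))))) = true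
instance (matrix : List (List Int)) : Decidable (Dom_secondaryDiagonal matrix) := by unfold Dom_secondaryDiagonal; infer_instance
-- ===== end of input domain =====

-- B replaces A's nested O(n^2) scan over all (i,j) pairs by direct single-pass indexing matrix[i][n-1-i].

-- ===== PORT A =====
-- nested for-loops over range(n) × range(n), appending matrix[i][j] when i+j == n-1
def secondaryDiagonal (matrix : List (List Int)) : List Int :=
  let n : Int := matrix.length
  (PySem.List.pyRange 0 (matrix.length : Int) 1).foldl (fun result i =>
    (PySem.List.pyRange 0 (matrix.length : Int) 1).foldl (fun result j =>
      if i + j == n - 1 then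
        result ++ [PySem.List.pyGetD (PySem.List.pyGetD matrix i []) j 0]
      else result) result) []

-- ===== PORT B =====
-- single comprehension [matrix[i][n-1-i] for i in range(n)]
def secondaryDiagonal_alt (matrix : List (List Int)) : List Int :=
  let n : Int := matrix.length
  (PySem.List.pyRange 0 n 1).map (fun i =>
    PySem.List.pyGetD (PySem.List.pyGetD matrix i []) (n - 1 - i) 0)

-- ===== PRECONDITION & SPEC =====
-- Pre_ excludes ragged matrices whose row i is shorter than n-i, where A (and B) raise IndexError.
def Pre_secondaryDiagonal (matrix : List (List Int)) : Prop :=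
  ∀ p ∈ matrix.zipIdx, matrix.length ≤ p.1.length + p.2
instance (matrix : List (List Int)) : Decidable (Pre_secondaryDiagonal matrix) := by
  unfold Pre_secondaryDiagonal; infer_instance

def pvWitness_secondaryDiagonal : List (List Int) := [[1, 2, 3], [4, 5, 6], [7, 8, 9]]

def Spec_secondaryDiagonal (matrix : List (List Int)) (out : List Int) : Prop :=
  out = secondaryDiagonal_alt matrix
instance (matrix : List (List Int)) (out : List Int) : Decidable (Spec_secondaryDiagonal matrix out) := by
  unfold Spec_secondaryDiagonal; infer_instance

-- ===== CLAIM (what is proved, stated in full; the proofs are below) =====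
def Claim_equal_secondaryDiagonal : Prop := ∀ (matrix : List (List Int)), Dom_secondaryDiagonal matrix → Pre_secondaryDiagonal matrix → Spec_secondaryDiagonal matrix (secondaryDiagonal matrix)

-- ===== LEMMAS AND PROOFS =====

-- the inner loop of A collects exactly the single j = n-1-i
lemma inner_filter (n i : Int) (h0 : 0 ≤ i) (hn : i < n) :
    (PySem.List.pyRange 0 n 1).filter (fun j => i + j == n - 1) = [n - 1 - i] := by
  have key : ∀ a b : Int, a ≤ n - 1 - i → n - 1 - i < b →
      (PySem.List.pyRange a b 1).filter (fun j => i + j == n - 1) = [n - 1 - i] := by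
    intro a b ha hb
    have hsplit := PySem.List.pyRange_one_append a (n - 1 - i) b ha (by omega)
    rw [hsplit, List.filter_append]
    have h1 : (PySem.List.pyRange a (n - 1 - i) 1).filter (fun j => i + j == n - 1) = [] := by
      rw [List.filter_eq_nil_iff]
      intro x hx
      have := (PySem.List.mem_pyRange_one).1 hx
      simp only [beq_iff_eq]; omega
    have hcons := PySem.List.pyRange_one_cons (a := n - 1 - i) (b := b) (by omega)
    rw [h1, hcons, List.filter_cons]
    have h2 : (PySem.List.pyRange (n - 1 - i + 1) b 1).filter (fun j => i + j == n - 1) = [] := by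
      rw [List.filter_eq_nil_iff]
      intro x hx
      have := (PySem.List.mem_pyRange_one).1 hx
      simp only [beq_iff_eq]; omega
    simp [h2]
  exact key 0 n (by omega) (by omega)

theorem secondaryDiagonal_spec : Claim_equal_secondaryDiagonal := by
  intro matrix _ _
  unfold Spec_secondaryDiagonal secondaryDiagonal secondaryDiagonal_alt
  set n : Int := (matrix.length : Int) with hn
  -- rewrite the outer fold body for each i actually in range
  rw [PySem.List.foldl_congr_mem
    (g := fun (result : List Int) (i : Int) =>
      result ++ [PySem.List.pyGetD (PySem.List.pyGetD matrix i []) (n - 1 - i) 0])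
    (h := by
      intro acc i hi
      have hi' := (PySem.List.mem_pyRange_one).1 hi
      rw [PySem.List.foldl_append_if]
      rw [inner_filter n i hi'.1 hi'.2]
      simp)]
  rw [PySem.List.foldl_append_singleton_eq_map]
  simp
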